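-- pv_equiv track=rewrite | github.com/MrBrantCode/unitest_baseline | mut_generate/mist_train_taco/taco_3019/solution.py | is_semi_fibonacci_string
-- ===== SOURCE A (Python) =====
-- def is_semi_fibonacci_string(nums: list[int]) -> bool:
--     """
--     Determines if a string represented by the counts of its letters is semi-Fibonacci.
--
--     Args:
--         nums (list[int]): A list of integers where each integer represents the count of a specific letter in the string.
--
--     Returns:
--         bool: True if the string is semi-Fibonacci, False otherwise.
--     """
--     import heapq
--
--     # Precomputed Fibonacci sequence and cumulative sums
--     FIBS = []
--     CUMSUMS = []
--     a = 0
--     b = 1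
--     cumsum = 0
--     while cumsum < 10 ** 12:
--         FIBS.append(b)
--         cumsum += b
--         CUMSUMS.append(cumsum)
--         (a, b) = (b, a + b)
--
--     # Calculate the total sum of the counts
--     s = sum(nums)
--
--     # Check if the total sum is in the cumulative sums of Fibonacci numbers
--     if s not in CUMSUMS:
--         return False
--
--     # Convert the counts to a max-heap
--     nums = [-n for n in nums]
--     heapq.heapify(nums)
--
--     # Process the heap to check if the counts can form a Fibonacci sequence
--     not_use = 0
--     for ind in range(CUMSUMS.index(s), -1, -1):
--         f = FIBS[ind]
--         max_num = -heapq.heappop(nums)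
--         if f > max_num:
--             return False
--         max_num -= f
--         heapq.heappush(nums, -not_use)
--         not_use = max_num
--
--     return True
-- ===== SOURCE B (Python) =====
-- def is_semi_fibonacci_string(nums: list[int]) -> bool:
--     # Same precomputation as the original; the heap is replaced by a plain
--     # list with a linear max-scan each round (simpler, no heapq).
--     FIBS = []
--     CUMSUMS = []
--     a, b, cumsum = 0, 1, 0
--     while cumsum < 10 ** 12:
--         FIBS.append(b)
--         cumsum += b
--         CUMSUMS.append(cumsum)
--         a, b = b, a + b
--
--     s = sum(nums)
--     if s not in CUMSUMS:
--         return False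
--
--     counts = list(nums)
--     not_use = 0
--     for f in reversed(FIBS[:CUMSUMS.index(s) + 1]):
--         m = max(counts)
--         counts.pop(counts.index(m))
--         if f > m:
--             return False
--         counts.append(not_use)
--         not_use = m - f
--     return True
-- ===== Notes on version B (the rewrite author's own statement) =====
-- stated objective: simpler
-- what changed: Replaces the heapq max-heap (negate, heapify, heappop/heappush) by a plain list scanned for its maximum each round and folds over the reversed Fibonacci prefix instead of counting an index down.
import Mathlib
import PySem

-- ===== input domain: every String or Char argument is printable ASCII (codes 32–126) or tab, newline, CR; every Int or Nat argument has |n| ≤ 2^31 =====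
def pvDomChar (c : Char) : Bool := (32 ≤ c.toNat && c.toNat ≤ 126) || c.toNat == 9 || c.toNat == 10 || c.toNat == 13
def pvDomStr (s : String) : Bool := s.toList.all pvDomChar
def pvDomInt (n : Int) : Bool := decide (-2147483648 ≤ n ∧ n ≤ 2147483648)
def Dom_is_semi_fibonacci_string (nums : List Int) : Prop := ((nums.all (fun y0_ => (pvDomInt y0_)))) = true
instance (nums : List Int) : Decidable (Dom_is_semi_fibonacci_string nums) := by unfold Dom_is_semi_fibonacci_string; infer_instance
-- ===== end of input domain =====

-- B replaces A's heapq max-heap by a plain list scanned for its maximum each round,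
-- folding over the reversed Fibonacci prefix (objective: simpler, no heap machinery).

-- Shared precomputation: both Pythons build FIBS/CUMSUMS with the identical while loop.
-- The fuel 100 only bounds the `while`: cumsum after n rounds is F(n+2)-1, which
-- exceeds 10^12 after 60 rounds, so the `cumsum < 10^12` guard, not the fuel, stops it.
def pvFibGen : Nat → Int → Int → Int → List Int × List Int
  | 0, _, _, _ => ([], [])
  | fuel+1, a, b, cumsum =>
    if cumsum < 10 ^ 12 then
      let r := pvFibGen fuel b (a + b) (cumsum + b)
      (b :: r.1, (cumsum + b) :: r.2)
    else ([], [])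

def pvFIBS : List Int := (pvFibGen 100 0 1 0).1
def pvCUMSUMS : List Int := (pvFibGen 100 0 1 0).2

-- ===== PORT A =====
-- heapq on the negated list is ported by its contract: heappop returns the minimum
-- value and removes one occurrence of it; the heap's internal array order is
-- unobservable, so the list is kept as a multiset (heappush = append).
def pvHeapPop (heap : List Int) : Option (Int × List Int) :=
  match PySem.List.min? heap (fun x => x) with
  | none => none
  | some m => some (m, (PySem.List.remove? heap m).getD heap)

-- the loop `for ind in range(CUMSUMS.index(s), -1, -1)`; the two `none => false`
-- branches are totality guards only (FIBS[ind] is always in range and the heap is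
-- never empty at a call, so Python never raises here).
def pvHeapRun (fibs : List Int) (heap : List Int) (notUse : Int) (ind : Nat) : Bool :=
  match PySem.List.pyGet? fibs (ind : Int) with
  | none => false
  | some f =>
    match pvHeapPop heap with
    | none => false
    | some (m, rest) =>
      let maxNum := -m
      if f > maxNum then false
      else
        let heap' := rest ++ [-notUse]
        match ind with
        | 0 => true
        | i + 1 => pvHeapRun fibs heap' (maxNum - f) i

def is_semi_fibonacci_string (nums : List Int) : Bool :=
  let s := nums.sum
  if s ∈ pvCUMSUMS then
    match PySem.List.index? pvCUMSUMS s with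
    | none => false   -- unreachable: s ∈ CUMSUMS
    | some k => pvHeapRun pvFIBS (nums.map (fun n => -n)) 0 k
  else false

-- ===== PORT B =====
-- `for f in reversed(FIBS[:ind+1])`: structural recursion on that list;
-- max(counts) / counts.pop(counts.index(m)) = max? / remove? (first occurrence).
def pvGreedy : List Int → List Int → Int → Bool
  | [], _, _ => true
  | f :: fs, counts, notUse =>
    match PySem.List.max? counts (fun x => x) with
    | none => false   -- totality guard; counts is never empty at a call
    | some m =>
      let counts' := (PySem.List.remove? counts m).getD counts
      if f > m then false
      else pvGreedy fs (counts' ++ [notUse]) (m - f)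

def is_semi_fibonacci_string_alt (nums : List Int) : Bool :=
  let s := nums.sum
  -- B's `if s not in CUMSUMS: return False` + `CUMSUMS.index(s)` as one lookup
  -- (index? = none exactly when s ∉ CUMSUMS)
  match PySem.List.index? pvCUMSUMS s with
  | none => false
  | some k => pvGreedy ((pvFIBS.take (k + 1)).reverse) nums 0

-- ===== PRECONDITION & SPEC =====
def Spec_is_semi_fibonacci_string (nums : List Int) (out : Bool) : Prop := out = is_semi_fibonacci_string_alt nums
instance (nums : List Int) (out : Bool) : Decidable (Spec_is_semi_fibonacci_string nums out) := by unfold Spec_is_semi_fibonacci_string; infer_instance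

-- ===== CLAIM (what is proved, stated in full; the proofs are below) =====
def Claim_equal_is_semi_fibonacci_string : Prop := ∀ (nums : List Int), Dom_is_semi_fibonacci_string nums → Spec_is_semi_fibonacci_string nums (is_semi_fibonacci_string nums)

-- ===== LEMMAS AND PROOFS =====

lemma pvFibGen_len : ∀ (fuel : Nat) (a b c : Int),
    (pvFibGen fuel a b c).1.length = (pvFibGen fuel a b c).2.length := by
  intro fuel
  induction fuel with
  | zero => intro a b c; simp [pvFibGen]
  | succ n ih => intro a b c; simp only [pvFibGen]; split <;> simp [ih]

-- the min of the negated list is the negated max (same first occurrence)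
lemma min_map_neg (xs : List Int) :
    PySem.List.min? (xs.map (fun n => -n)) (fun x => x)
      = Option.map (fun n => -n) (PySem.List.max? xs (fun x => x)) := by
  unfold PySem.List.min? PySem.List.max?
  rw [List.foldl_map,
    show (none : Option Int) = Option.map (fun n : Int => -n) none from rfl]
  refine List.foldl_hom (Option.map (fun n : Int => -n)) ?_
  intro acc x
  cases acc with
  | none => rfl
  | some m =>
    simp only [Option.map_some]
    by_cases h : m < x
    · rw [if_pos h, if_pos (by omega : (-x : Int) < -m)]; rfl
    · rw [if_neg h, if_neg (by omega : ¬ (-x : Int) < -m)]; rfl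

lemma remove_map_neg (xs : List Int) (v : Int) :
    PySem.List.remove? (xs.map (fun n => -n)) (-v)
      = Option.map (List.map (fun n => -n)) (PySem.List.remove? xs v) := by
  induction xs with
  | nil => rfl
  | cons x xs ih =>
    by_cases h : x = v
    · subst h
      simp [PySem.List.remove?_cons_self]
    · rw [List.map_cons,
        PySem.List.remove?_cons_of_ne _ (by omega : -x ≠ -v),
        PySem.List.remove?_cons_of_ne _ h, ih]
      cases PySem.List.remove? xs v <;> rfl

lemma run_eq_greedy (fibs : List Int) : ∀ (ind : Nat) (counts : List Int) (notUse : Int),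
    ind < fibs.length →
    pvHeapRun fibs (counts.map (fun n => -n)) notUse ind
      = pvGreedy ((fibs.take (ind + 1)).reverse) counts notUse := by
  intro ind
  induction ind with
  | zero =>
    intro counts notUse h
    rw [List.take_add_one, List.getElem?_eq_getElem h]
    simp only [Option.toList_some, List.reverse_append, List.reverse_cons,
      List.reverse_nil, List.nil_append, List.singleton_append]
    rw [pvHeapRun, PySem.List.pyGet?_natCast, List.getElem?_eq_getElem h]
    simp only [pvGreedy, pvHeapPop, min_map_neg]
    cases hm : PySem.List.max? counts (fun x => x) with
    | none => rfl
    | some m =>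
      simp only [Option.map_some]
      rw [show (- -m : Int) = m by ring]
      by_cases hf : fibs[0] > m
      · rw [if_pos hf, if_pos hf]
      · rw [if_neg hf, if_neg hf]
        simp [pvGreedy]
  | succ i ih =>
    intro counts notUse h
    rw [List.take_add_one, List.getElem?_eq_getElem h]
    simp only [Option.toList_some, List.reverse_append, List.reverse_cons,
      List.reverse_nil, List.nil_append, List.singleton_append]
    rw [pvHeapRun, PySem.List.pyGet?_natCast, List.getElem?_eq_getElem h]
    simp only [pvGreedy, pvHeapPop, min_map_neg]
    cases hm : PySem.List.max? counts (fun x => x) with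
    | none => rfl
    | some m =>
      simp only [Option.map_some]
      rw [show (- -m : Int) = m by ring]
      by_cases hf : fibs[i + 1] > m
      · rw [if_pos hf, if_pos hf]
      · rw [if_neg hf, if_neg hf]
        have hrest : (PySem.List.remove? (counts.map (fun n => -n)) (-m)).getD (counts.map (fun n => -n)) ++ [-notUse]
            = ((PySem.List.remove? counts m).getD counts ++ [notUse]).map (fun n => -n) := by
          rw [remove_map_neg]
          cases PySem.List.remove? counts m <;> simp
        rw [hrest, ih _ _ (by omega)]

lemma index_lt_len {s : Int} {k : Nat} (h : PySem.List.index? pvCUMSUMS s = some k) :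
    k < pvFIBS.length := by
  obtain ⟨hk, -, -⟩ := PySem.List.getElem_of_index?_eq_some h
  have := pvFibGen_len 100 0 1 0
  unfold pvFIBS
  unfold pvCUMSUMS at hk
  omega

-- ===== VERDICT (by name: the statement is the Claim_ definition above) =====
theorem is_semi_fibonacci_string_spec : Claim_equal_is_semi_fibonacci_string := by
  intro nums _
  unfold Spec_is_semi_fibonacci_string is_semi_fibonacci_string is_semi_fibonacci_string_alt
  show (if nums.sum ∈ pvCUMSUMS then
      match PySem.List.index? pvCUMSUMS nums.sum with
      | none => false
      | some k => pvHeapRun pvFIBS (List.map (fun n => -n) nums) 0 k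
    else false) =
    match PySem.List.index? pvCUMSUMS nums.sum with
    | none => false
    | some k => pvGreedy (List.take (k + 1) pvFIBS).reverse nums 0
  cases hidx : PySem.List.index? pvCUMSUMS nums.sum with
  | none =>
    have hnm : nums.sum ∉ pvCUMSUMS := (PySem.List.index?_eq_none_iff _ _).mp hidx
    rw [if_neg hnm]
  | some k =>
    have hmem : nums.sum ∈ pvCUMSUMS :=
      (PySem.List.index?_isSome_iff pvCUMSUMS nums.sum).mp (by rw [hidx]; rfl)
    rw [if_pos hmem]
    exact run_eq_greedy pvFIBS k nums 0 (index_lt_len hidx)
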